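-- pv_equiv track=rewrite | github.com/DankerMu/Digital-earth | services/data-pipeline/src/terrain/mesh_generator.py | high_water_mark_decode
-- ===== SOURCE A (Python) =====
-- from typing import Iterable, Sequence
--
-- def high_water_mark_decode(codes: Sequence[int]) -> list[int]:
--     out: list[int] = []
--     highest = 0
--     for code in codes:
--         code_i = int(code)
--         out.append(highest - code_i)
--         if code_i == 0:
--             highest += 1
--     return out
-- ===== SOURCE B (Python) =====
-- def high_water_mark_decode(codes):
--     values = [int(c) for c in codes]
--     total_zeros = values.count(0)
--     out = []
--     seen_from_right = 0
--     for v in reversed(values):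
--         if v == 0:
--             seen_from_right += 1
--         out.append(total_zeros - seen_from_right - v)
--     out.reverse()
--     return out
-- ===== Notes on version B (the rewrite author's own statement) =====
-- stated objective: alternative
-- what changed: Instead of A's forward pass with a rising high-water counter, B counts the zeros once with list.count, then traverses the values right-to-left maintaining a suffix zero count, emitting total_zeros - suffix_zeros - value, building the output back-to-front and reversing it.
import Mathlib
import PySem

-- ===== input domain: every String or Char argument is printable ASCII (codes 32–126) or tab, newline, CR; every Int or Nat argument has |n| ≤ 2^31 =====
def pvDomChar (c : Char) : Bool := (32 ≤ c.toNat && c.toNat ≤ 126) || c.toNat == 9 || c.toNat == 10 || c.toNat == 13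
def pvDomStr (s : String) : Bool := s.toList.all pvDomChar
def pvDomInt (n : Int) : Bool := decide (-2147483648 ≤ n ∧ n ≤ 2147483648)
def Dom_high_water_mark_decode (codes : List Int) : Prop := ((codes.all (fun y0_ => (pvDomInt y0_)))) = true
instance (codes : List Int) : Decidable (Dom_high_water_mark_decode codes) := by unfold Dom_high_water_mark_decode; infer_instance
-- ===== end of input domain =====

-- B replaces A's forward high-water loop by a global zero count plus a backward pass
-- with a suffix zero counter, building the output back-to-front (objective: alternative).

-- ===== PORT A =====
-- single forward loop carrying (out, highest); int(code) is identity on Int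
def high_water_mark_decode (codes : List Int) : List Int :=
  (codes.foldl
    (fun (s : List Int × Int) code =>
      (s.1 ++ [s.2 - code], if code = 0 then s.2 + 1 else s.2))
    ([], 0)).1

-- ===== PORT B =====
-- Source B: values = [int(c) for c in codes]; Z = values.count(0); backward loop; out.reverse()
def high_water_mark_decode_alt (codes : List Int) : List Int :=
  let values := codes.map (fun c => c)
  let total_zeros : Int := PySem.List.count values 0
  let r := values.reverse.foldl
    (fun (s : List Int × Int) v =>
      let s2 := if v = 0 then s.2 + 1 else s.2
      (s.1 ++ [total_zeros - s2 - v], s2))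
    ([], 0)
  r.1.reverse

-- ===== PRECONDITION & SPEC =====
def Spec_high_water_mark_decode (codes : List Int) (out : List Int) : Prop := out = high_water_mark_decode_alt codes
instance (codes : List Int) (out : List Int) : Decidable (Spec_high_water_mark_decode codes out) := by unfold Spec_high_water_mark_decode; infer_instance

-- ===== CLAIM (what is proved, stated in full; the proofs are below) =====
def Claim_equal_high_water_mark_decode : Prop := ∀ (codes : List Int), Dom_high_water_mark_decode codes → Spec_high_water_mark_decode codes (high_water_mark_decode codes)

-- ===== LEMMAS AND PROOFS =====

-- normal form of A's loop
def aDec : List Int → Int → List Int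
  | [], _ => []
  | c :: t, h => (h - c) :: aDec t (if c = 0 then h + 1 else h)

-- normal form of B's backward loop (Z fixed)
def gDec (Z : Int) : List Int → Int → List Int
  | [], _ => []
  | v :: t, s =>
      let s2 := if v = 0 then s + 1 else s
      (Z - s2 - v) :: gDec Z t s2

-- integer zero count
def zc : List Int → Int
  | [] => 0
  | v :: t => (if v = 0 then 1 else 0) + zc t

theorem aFold (cs : List Int) (acc : List Int) (h : Int) :
    (cs.foldl
      (fun (s : List Int × Int) code =>
        (s.1 ++ [s.2 - code], if code = 0 then s.2 + 1 else s.2))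
      (acc, h)).1 = acc ++ aDec cs h := by
  induction cs generalizing acc h with
  | nil => simp [aDec]
  | cons c t ih => simp [aDec, ih]

theorem bFold (Z : Int) (l : List Int) (acc : List Int) (s : Int) :
    (l.foldl
      (fun (st : List Int × Int) v =>
        let s2 := if v = 0 then st.2 + 1 else st.2
        (st.1 ++ [Z - s2 - v], s2))
      (acc, s)).1 = acc ++ gDec Z l s := by
  induction l generalizing acc s with
  | nil => simp [gDec]
  | cons v t ih => simp [gDec, ih]

theorem gDec_append (Z : Int) (l1 l2 : List Int) (s : Int) :
    gDec Z (l1 ++ l2) s = gDec Z l1 s ++ gDec Z l2 (s + zc l1) := by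
  induction l1 generalizing s with
  | nil => simp [gDec, zc]
  | cons v t ih =>
    simp only [List.cons_append, gDec, zc, ih]
    split_ifs with hv <;> simp [hv] <;> ring_nf

theorem zc_eq_count (l : List Int) : zc l = PySem.List.count l 0 := by
  induction l with
  | nil => simp [zc, PySem.List.count]
  | cons v t ih =>
    simp only [zc, ih, PySem.List.count_eq, List.count_cons]
    by_cases hv : v = 0 <;> simp [hv] <;> ring

theorem zc_append (l1 l2 : List Int) : zc (l1 ++ l2) = zc l1 + zc l2 := by
  induction l1 with
  | nil => simp [zc]
  | cons v t ih => simp [zc, ih]; ring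

theorem zc_reverse (l : List Int) : zc l.reverse = zc l := by
  induction l with
  | nil => rfl
  | cons v t ih => rw [List.reverse_cons, zc_append, ih]; simp [zc]; ring

theorem gDec_rev (Z : Int) (cs : List Int) (s : Int) :
    (gDec Z cs.reverse s).reverse = aDec cs (Z - s - zc cs) := by
  induction cs generalizing s with
  | nil => simp [gDec, aDec]
  | cons c t ih =>
    rw [List.reverse_cons, gDec_append, List.reverse_append]
    by_cases hc : c = 0 <;>
      simp [gDec, aDec, zc, zc_reverse, ih, hc] <;> first | (constructor <;> ring_nf) | ring_nf

-- ===== VERDICT (by name: the statement is the Claim_ definition above) =====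
theorem high_water_mark_decode_spec : Claim_equal_high_water_mark_decode := by
  intro codes _
  unfold Spec_high_water_mark_decode high_water_mark_decode high_water_mark_decode_alt
  simp only [List.map_id']
  rw [aFold, bFold, List.nil_append, List.nil_append, gDec_rev, ← zc_eq_count]
  ring_nf
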